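-- pv_equiv track=rewrite | github.com/mjenrungrot/musescore-dataset-generator | annotationGenerator.py | splitCentersByStrips
-- ===== SOURCE A (Python) =====
-- def splitCentersByStrips(centers, splitter_array):
--     """
--     Split list of note centers by strip.
--     """
--     # Sort by rows
--     row_sorted_centers = sorted(centers, key=lambda x: x[1])
--
--     # Split notehead into strips
--     strips = {}
--     current_offset = 0
--     counter = 0
--     for i in range(1, len(splitter_array) + 1):
--         strip = []
--         for note_center in row_sorted_centers[current_offset:]:
--             strip.append(note_center)
--             counter += 1
--             if counter == splitter_array[i - 1]:
--                 break
--
--         strips[i] = strip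
--         current_offset = counter
--         if current_offset == len(centers):
--             return strips, i
--
--     assert False, "Should haven't been here"
--     return None
-- ===== SOURCE B (Python) =====
-- def splitCentersByStrips(centers, splitter_array):
--     """Split list of note centers by strip: sort once, then slice directly by
--     cumulative offsets in a single pass (no per-note counter, no remainder re-slicing)."""
--     xs = sorted(centers, key=lambda c: c[1])
--     n = len(xs)
--     strips = {}
--     off = 0
--     for i, t in enumerate(splitter_array, 1):
--         end = t if off < t <= n else n
--         strips[i] = xs[off:end]
--         off = end
--         if off == n:
--             return strips, i
--     raise AssertionError("splitter_array does not cover all centers")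
-- ===== Notes on version B (the rewrite author's own statement) =====
-- stated objective: alternative
-- what changed: B sorts once and cuts each strip with one direct slice computed from the cumulative offsets, instead of A's per-note inner loop with a counter over a freshly copied remainder slice per strip.
import Mathlib
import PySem

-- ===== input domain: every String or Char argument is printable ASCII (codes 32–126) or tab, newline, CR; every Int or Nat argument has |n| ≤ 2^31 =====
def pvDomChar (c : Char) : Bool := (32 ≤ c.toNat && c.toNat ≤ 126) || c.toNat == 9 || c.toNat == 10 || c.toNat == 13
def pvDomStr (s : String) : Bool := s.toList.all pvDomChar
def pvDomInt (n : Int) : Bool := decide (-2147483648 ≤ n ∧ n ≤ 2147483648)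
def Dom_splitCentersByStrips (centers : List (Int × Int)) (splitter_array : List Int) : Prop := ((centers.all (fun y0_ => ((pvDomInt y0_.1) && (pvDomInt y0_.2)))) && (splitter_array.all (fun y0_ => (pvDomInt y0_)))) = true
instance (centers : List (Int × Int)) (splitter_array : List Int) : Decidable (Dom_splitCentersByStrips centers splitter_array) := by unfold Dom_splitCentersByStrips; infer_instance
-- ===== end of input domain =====

-- B replaces A's per-note inner loop over the re-sliced remainder by one direct slice per strip
-- computed from the cumulative offsets (objective: alternative single-pass slicing formulation).

-- ===== PORT A =====
-- inner 'for note_center in row_sorted_centers[current_offset:]' with counter and break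
def pvInnerA (targ : Int) : List (Int × Int) → Int → List (Int × Int) × Int
  | [], counter => ([], counter)
  | c :: rest, counter =>
    let counter' := counter + 1
    if counter' = targ then ([c], counter')
    else
      let r := pvInnerA targ rest counter'
      (c :: r.1, r.2)

-- outer 'for i in range(1, len(splitter_array) + 1)'; strips[i] = strip is ported as
-- an append, exact here because the key i is strictly increasing hence always fresh.
-- The [] case is Python's 'assert False' fallthrough (excluded by Pre_).
def pvOuterA (rs : List (Int × Int)) (n : Int) :
    List Int → Int → Int → Int → List (Int × List (Int × Int)) → (List (Int × List (Int × Int))) × Int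
  | [], _, _, _, _ => ([], 0)
  | t :: ts, i, current_offset, counter, strips =>
    let r := pvInnerA t (PySem.List.slice rs (some current_offset) none) counter
    let strips' := strips ++ [(i, r.1)]
    if r.2 = n then (strips', i)
    else pvOuterA rs n ts (i + 1) r.2 r.2 strips'

def splitCentersByStrips (centers : List (Int × Int)) (splitter_array : List Int) : (List (Int × List (Int × Int))) × Int :=
  let row_sorted_centers := PySem.List.sorted centers (fun x => x.2)
  pvOuterA row_sorted_centers (centers.length : Int) splitter_array 1 0 0 []

-- ===== PORT B =====
-- 'for i, t in enumerate(splitter_array, 1)': one slice per strip by cumulative offsets.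
-- strips[i] = … ported as an append (key i always fresh); [] case is B's 'raise AssertionError'.
def pvLoopB (xs : List (Int × Int)) (n : Int) :
    List Int → Int → Int → List (Int × List (Int × Int)) → (List (Int × List (Int × Int))) × Int
  | [], _, _, _ => ([], 0)
  | t :: ts, i, off, strips =>
    let e := if off < t ∧ t ≤ n then t else n
    let strips' := strips ++ [(i, PySem.List.slice xs (some off) (some e))]
    if e = n then (strips', i)
    else pvLoopB xs n ts (i + 1) e strips'

def splitCentersByStrips_alt (centers : List (Int × Int)) (splitter_array : List Int) : (List (Int × List (Int × Int))) × Int :=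
  let xs := PySem.List.sorted centers (fun c => c.2)
  pvLoopB xs (xs.length : Int) splitter_array 1 0 []

-- ===== PRECONDITION & SPEC =====
-- Pre_ excludes exactly the inputs on which A raises AssertionError (falls off the loop):
-- an empty splitter_array, or cumulative counts forming a strict chain 0 < t₁ < … < t_k < len(centers).
def Pre_splitCentersByStrips (centers : List (Int × Int)) (splitter_array : List Int) : Prop :=
  splitter_array ≠ [] ∧ ¬ List.IsChain (· < ·) ((0 : Int) :: splitter_array ++ [(centers.length : Int)])
instance (centers : List (Int × Int)) (splitter_array : List Int) : Decidable (Pre_splitCentersByStrips centers splitter_array) := by unfold Pre_splitCentersByStrips; infer_instance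
def pvWitness_splitCentersByStrips : (List (Int × Int)) × List Int := ([(1, 5), (2, 3), (4, 4)], [3])

def Spec_splitCentersByStrips (centers : List (Int × Int)) (splitter_array : List Int) (out : (List (Int × List (Int × Int))) × Int) : Prop := out = splitCentersByStrips_alt centers splitter_array
instance (centers : List (Int × Int)) (splitter_array : List Int) (out : (List (Int × List (Int × Int))) × Int) : Decidable (Spec_splitCentersByStrips centers splitter_array out) := by unfold Spec_splitCentersByStrips; infer_instance

-- ===== CLAIM (what is proved, stated in full; the proofs are below) =====
def Claim_equal_splitCentersByStrips : Prop := ∀ (centers : List (Int × Int)) (splitter_array : List Int), Dom_splitCentersByStrips centers splitter_array → Pre_splitCentersByStrips centers splitter_array → Spec_splitCentersByStrips centers splitter_array (splitCentersByStrips centers splitter_array)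

-- ===== LEMMAS AND PROOFS =====

-- A's inner loop takes elements until the counter hits targ: it is a take, and the final
-- counter is the cumulative position reached.
theorem pvInnerA_eq (targ : Int) (l : List (Int × Int)) (c : Int) :
    pvInnerA targ l c =
      (l.take (if c < targ ∧ targ ≤ c + l.length then (targ - c).toNat else l.length),
       if c < targ ∧ targ ≤ c + l.length then targ else c + l.length) := by
  induction l generalizing c with
  | nil =>
    simp only [pvInnerA, List.take_nil, List.length_nil, Nat.cast_zero, add_zero]
    rw [if_neg (by omega : ¬ (c < targ ∧ targ ≤ c))]
  | cons x rest ih =>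
    simp only [pvInnerA]
    by_cases h : c + 1 = targ
    · have hcond : c < targ ∧ targ ≤ c + ((x :: rest).length : Int) := by
        simp only [List.length_cons]; push_cast; omega
      have h1 : (targ - c).toNat = 1 := by omega
      rw [if_pos h, if_pos hcond, if_pos hcond, h1]
      simp [List.take_succ_cons, h]
    · rw [if_neg h, ih (c + 1)]
      dsimp only
      by_cases hc : c < targ ∧ targ ≤ c + ((x :: rest).length : Int)
      · have hc' : c + 1 < targ ∧ targ ≤ c + 1 + (rest.length : Int) := by
          obtain ⟨h1, h2⟩ := hc
          simp only [List.length_cons] at h2; push_cast at h2; omega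
        have h1 : (targ - c).toNat = (targ - (c + 1)).toNat + 1 := by omega
        rw [if_pos hc, if_pos hc', if_pos hc, if_pos hc', h1, List.take_succ_cons]
      · have hc' : ¬ (c + 1 < targ ∧ targ ≤ c + 1 + (rest.length : Int)) := by
          simp only [List.length_cons] at hc; push_cast at hc; omega
        rw [if_neg hc, if_neg hc', if_neg hc, if_neg hc', List.length_cons,
          List.take_succ_cons, List.take_length]
        simp only [Prod.mk.injEq]
        exact ⟨trivial, by push_cast; omega⟩

-- A's outer loop (after resolving the inner loop) is exactly B's loop, for a Nat offset o ≤ xs.length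
theorem pvOuter_eq_loopB (xs : List (Int × Int)) (ts : List Int) :
    ∀ (o : Nat) (i : Int) (strips : List (Int × List (Int × Int))), o ≤ xs.length →
    pvOuterA xs (xs.length : Int) ts i (o : Int) (o : Int) strips =
      pvLoopB xs (xs.length : Int) ts i (o : Int) strips := by
  induction ts with
  | nil => intro o i strips _; rfl
  | cons t ts ih =>
    intro o i strips ho
    simp only [pvOuterA, pvLoopB, PySem.List.slice_from_natCast]
    rw [pvInnerA_eq]
    have hlen : (xs.drop o).length = xs.length - o := List.length_drop ..
    by_cases hc : (o : Int) < t ∧ t ≤ (o : Int) + ((xs.drop o).length : Int)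
    · have hc' : (o : Int) < t ∧ t ≤ (xs.length : Int) := by
        refine ⟨hc.1, ?_⟩; have := hc.2; rw [hlen] at this; omega
      have htn : 0 ≤ t := le_of_lt (lt_of_le_of_lt (Int.natCast_nonneg o) hc.1)
      have hslice : PySem.List.slice xs (some (o : Int)) (some t)
          = (xs.drop o).take (t.toNat - o) := by
        rw [PySem.List.slice_toNat _ (Int.natCast_nonneg o) htn]; simp
      have ht : (t - (o : Int)).toNat = t.toNat - o := by omega
      rw [if_pos hc, if_pos hc, if_pos hc', hslice, ht]
      by_cases he : t = (xs.length : Int)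
      · rw [if_pos he, if_pos he]
      · rw [if_neg he, if_neg he]
        have hto : t = ((t.toNat : Nat) : Int) := by omega
        rw [hto]
        exact ih t.toNat (i + 1) _ (by omega)
    · have hc' : ¬ ((o : Int) < t ∧ t ≤ (xs.length : Int)) := by
        rw [hlen] at hc; omega
      have hslice : PySem.List.slice xs (some (o : Int)) (some (xs.length : Int))
          = (xs.drop o).take ((xs.drop o).length) := by
        rw [PySem.List.slice_natCast]; simp
      have heq : (o : Int) + ((xs.drop o).length : Int) = (xs.length : Int) := by
        rw [hlen]; omega
      rw [if_neg hc, if_neg hc, if_neg hc', hslice, List.take_length, heq,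
        if_pos rfl, if_pos rfl]

-- ===== VERDICT (by name: the statement is the Claim_ definition above) =====
theorem splitCentersByStrips_spec : Claim_equal_splitCentersByStrips := by
  intro centers splitter _ _
  unfold Spec_splitCentersByStrips splitCentersByStrips splitCentersByStrips_alt
  have hl : (PySem.List.sorted centers (fun x => x.2)).length = centers.length :=
    PySem.List.length_sorted ..
  rw [← hl]
  exact pvOuter_eq_loopB _ splitter 0 1 [] (Nat.zero_le _)
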